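-- pv_equiv track=rewrite | github.com/SINHOLEE/Algorithm | swexpert/최고상금.py | pick_2_subset
-- ===== SOURCE A (Python) =====
-- def pick_2_subset(nums_list):
--     dumy = [0] * len(nums_list)
--     # 부분집합 두개인 애들의 인덱스를 뽑아라
--     # 확인용
--     dumies = []
--     for i in range(1<<len(nums_list)):
--         temp = []
--         for j in range(len(nums_list)):
--             if i & (1<<j):
--                 temp += [j]
--         if len(temp) == 2:
--             dumy = mk_new_list(nums_list, temp)
--             dumies += [dumy]
--     return dumies
--
-- def mk_new_list(nums_list, temp):
--     dumy = [0] * len(nums_list)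
--     for i in range(len(nums_list)):
--
--         if i in temp:
--             for j in range(len(temp)):
--                 if i == temp[j]:
--                     pass
--                 else:
--                     dumy[i] = nums_list[temp[j]]
--         else:
--             dumy[i] = nums_list[i]
--     return dumy
-- ===== SOURCE B (Python) =====
-- def pick_2_subset(nums_list):
--     # Enumerate index pairs j < k directly (ordered by 2**j + 2**k, i.e. by (k, j)),
--     # building each swapped copy in one pass.
--     n = len(nums_list)
--     out = []
--     for k in range(n):
--         for j in range(k):
--             out.append([nums_list[k] if t == j else nums_list[j] if t == k else x
--                         for t, x in enumerate(nums_list)])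
--     return out
-- ===== Notes on version B (the rewrite author's own statement) =====
-- stated objective: faster
-- what changed: Instead of enumerating all 2^n bitmasks and collecting the set bits of each to find the two-element subsets, B enumerates the index pairs j<k directly in the same (bitmask-value) order and builds each swapped copy in one comprehension pass.
import Mathlib
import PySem

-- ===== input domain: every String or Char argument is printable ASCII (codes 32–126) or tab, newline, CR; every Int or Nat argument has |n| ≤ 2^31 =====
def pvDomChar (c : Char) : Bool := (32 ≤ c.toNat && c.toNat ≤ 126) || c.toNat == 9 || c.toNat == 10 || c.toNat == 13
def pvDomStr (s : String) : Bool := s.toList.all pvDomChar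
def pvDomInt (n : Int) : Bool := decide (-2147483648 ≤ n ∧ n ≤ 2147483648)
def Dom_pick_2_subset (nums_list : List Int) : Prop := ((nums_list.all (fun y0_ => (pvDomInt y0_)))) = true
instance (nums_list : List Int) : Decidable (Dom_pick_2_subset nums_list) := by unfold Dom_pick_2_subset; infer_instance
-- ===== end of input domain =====

-- B replaces A's O(2^n·n) all-subsets enumeration by direct enumeration of the index pairs
-- in the same (bitmask-value) order; objective: faster (asymptotic).

-- ===== PORT A =====
-- helper `mk_new_list` of A; all indexing is in range (temp ⊆ range(len)), so pyGetD/pySetD are exact here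
def mk_new_list (nums_list : List Int) (temp : List Int) : List Int :=
  let dumy := List.replicate nums_list.length (0 : Int)
  (PySem.List.pyRange 0 (nums_list.length : Int) 1).foldl (fun dumy i =>
    if temp.contains i then
      (PySem.List.pyRange 0 (temp.length : Int) 1).foldl (fun dumy j =>
        if i = PySem.List.pyGetD temp j 0 then dumy
        else PySem.List.pySetD dumy i (PySem.List.pyGetD nums_list (PySem.List.pyGetD temp j 0) 0)) dumy
    else PySem.List.pySetD dumy i (PySem.List.pyGetD nums_list i 0)) dumy

def pick_2_subset (nums_list : List Int) : List (List Int) :=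
  (PySem.List.pyRange 0 ((1 : Int) <<< nums_list.length) 1).foldl (fun dumies i =>
    let temp : List Int :=
      (PySem.List.pyRange 0 (nums_list.length : Int) 1).foldl (fun temp j =>
        if PySem.Int.band i ((1 : Int) <<< j.toNat) ≠ 0 then temp ++ [j] else temp) []
    if temp.length = 2 then dumies ++ [mk_new_list nums_list temp] else dumies) []


-- ===== PORT B =====
def pick_2_subset_alt (nums_list : List Int) : List (List Int) :=
  (PySem.List.pyRange 0 (nums_list.length : Int) 1).foldl (fun out k =>
    (PySem.List.pyRange 0 k 1).foldl (fun out j =>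
      out ++ [(PySem.List.enumerate nums_list).map (fun tx =>
        if tx.1 = j then PySem.List.pyGetD nums_list k 0
        else if tx.1 = k then PySem.List.pyGetD nums_list j 0
        else tx.2)]) out) []


-- ===== PRECONDITION & SPEC =====
def Spec_pick_2_subset (nums_list : List Int) (out : List (List Int)) : Prop := out = pick_2_subset_alt nums_list
instance (nums_list : List Int) (out : List (List Int)) : Decidable (Spec_pick_2_subset nums_list out) := by unfold Spec_pick_2_subset; infer_instance

-- ===== CLAIM (what is proved, stated in full; the proofs are below) =====
def Claim_equal_pick_2_subset : Prop := ∀ (nums_list : List Int), Dom_pick_2_subset nums_list → Spec_pick_2_subset nums_list (pick_2_subset nums_list)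

-- ===== LEMMAS AND PROOFS =====

-- the set-bit indices of m below n, ascending — the value of A's `temp` at mask m
def pvBits (m n : Nat) : List Int :=
  ((List.range n).filter (fun t => m.testBit t)).map (fun (t : Nat) => (t : Int))

theorem pvShift1 (t : Nat) : ((1 : Int) <<< ((t : Nat) : Int)) = ((2 ^ t : Nat) : Int) := by
  rw [show (1 : Int) = ((1 : Nat) : Int) from rfl, Int.shiftLeft_natCast]
  simp [Nat.shiftLeft_eq]

theorem pvBandBit (m t : Nat) :
    (PySem.Int.band (m : Int) ((1 : Int) <<< ((t : Nat) : Int)) ≠ 0) ↔ m.testBit t := by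
  rw [pvShift1, PySem.Int.band_natCast, Nat.and_two_pow]
  cases h : m.testBit t <;> simp [h]

theorem pvTemp (m n : Nat) :
    (PySem.List.pyRange 0 (n : Int) 1).foldl (fun temp j =>
        if PySem.Int.band (m : Int) ((1 : Int) <<< j.toNat) ≠ 0 then temp ++ [j] else temp) []
      = pvBits m n := by
  induction n with
  | zero => simp [PySem.List.pyRange_one_eq_nil, pvBits]
  | succ n ih =>
    rw [Nat.cast_add, Nat.cast_one, PySem.List.pyRange_one_succ_right (by positivity),
      List.foldl_append, ih]
    have hb : pvBits m (n + 1) = pvBits m n ++ (if m.testBit n then [((n : Nat) : Int)] else []) := by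
      cases h : m.testBit n <;>
        simp [pvBits, List.range_succ, List.filter_append, h]
    rw [hb]
    simp only [List.foldl_cons, List.foldl_nil, Int.toNat_natCast]
    by_cases h : m.testBit n
    · rw [if_pos (by rw [pvBandBit]; exact h), if_pos h]
    · rw [if_neg (by rw [pvBandBit]; exact h), if_neg h, List.append_nil]

theorem pvSetFoldLen (G : Int → Int) (l : List Int) (d : List Int) :
    (l.foldl (fun d i => PySem.List.pySetD d i (G i)) d).length = d.length := by
  induction l generalizing d with
  | nil => rfl
  | cons x xs ih => simp [ih, PySem.List.length_pySetD]

theorem pvSetFoldGet (G : Int → Int) (b : Nat) (d : List Int) (t : Nat) :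
    ((PySem.List.pyRange 0 (b : Int) 1).foldl (fun d i => PySem.List.pySetD d i (G i)) d)[t]?
      = if t < b ∧ t < d.length then some (G (t : Int)) else d[t]? := by
  induction b with
  | zero =>
    simp [PySem.List.pyRange_one_eq_nil]
  | succ b ih =>
    rw [Nat.cast_add, Nat.cast_one, PySem.List.pyRange_one_succ_right (by positivity),
      List.foldl_append]
    simp only [List.foldl_cons, List.foldl_nil]
    rw [show ((b : Int)) = ((b : Nat) : Int) from rfl, PySem.List.pySetD_natCast,
      List.getElem?_set, pvSetFoldLen, ih]
    by_cases hbt : b = t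
    · subst hbt
      by_cases hl : b < d.length
      · simp [hl]
      · simp [hl, List.getElem?_eq_none_iff.mpr (by omega : d.length ≤ b)]
    · have hne : ¬ t = b := fun h => hbt h.symm
      by_cases h1 : t < b <;> by_cases h2 : t < d.length <;>
        simp [hbt, hne, h1, h2, show t < b + 1 ↔ t < b ∨ t = b by omega]

theorem pvSetFold (G : Int → Int) (n : Nat) (d : List Int) (hd : d.length = n) :
    (PySem.List.pyRange 0 (n : Int) 1).foldl (fun d i => PySem.List.pySetD d i (G i)) d
      = (List.range n).map (fun (t : Nat) => G (t : Int)) := by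
  apply List.ext_getElem?
  intro t
  rw [pvSetFoldGet, List.getElem?_map]
  by_cases ht : t < n
  · rw [List.getElem?_range ht]
    simp [ht, hd]
  · have h1 : (List.range n)[t]? = none := List.getElem?_eq_none_iff.mpr (by simpa using ht)
    have h2 : d[t]? = none := List.getElem?_eq_none_iff.mpr (by rw [hd]; omega)
    simp [ht, h1, h2]

-- the common normal form of one output row: nums with positions j and k swapped
def pvSwap (nums : List Int) (j k : Nat) : List Int :=
  (List.range nums.length).map (fun (t : Nat) =>
    if (t : Int) = (j : Int) then PySem.List.pyGetD nums (k : Int) 0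
    else if (t : Int) = (k : Int) then PySem.List.pyGetD nums (j : Int) 0
    else PySem.List.pyGetD nums (t : Int) 0)

theorem pvMk (nums : List Int) (j k : Nat) (hjk : j ≠ k) :
    mk_new_list nums [(j : Int), (k : Int)] = pvSwap nums j k := by
  have hjkI : ((j : Nat) : Int) ≠ ((k : Nat) : Int) := fun h => hjk (by exact_mod_cast h)
  have hkjI : ((k : Nat) : Int) ≠ ((j : Nat) : Int) := fun h => hjkI h.symm
  have hg0 : PySem.List.pyGetD [(j : Int), (k : Int)] 0 0 = (j : Int) := by simp [pysem]
  have hg1 : PySem.List.pyGetD [(j : Int), (k : Int)] 1 0 = (k : Int) := by simp [pysem]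
  unfold mk_new_list
  have hstep : ∀ (d : List Int) (i : Int),
      (if [(j : Int), (k : Int)].contains i then
        (PySem.List.pyRange 0 (([(j : Int), (k : Int)].length : Nat) : Int) 1).foldl (fun d j' =>
          if i = PySem.List.pyGetD [(j : Int), (k : Int)] j' 0 then d
          else PySem.List.pySetD d i (PySem.List.pyGetD nums (PySem.List.pyGetD [(j : Int), (k : Int)] j' 0) 0)) d
      else PySem.List.pySetD d i (PySem.List.pyGetD nums i 0))
      = PySem.List.pySetD d i
          (if i = (j : Int) then PySem.List.pyGetD nums (k : Int) 0
           else if i = (k : Int) then PySem.List.pyGetD nums (j : Int) 0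
           else PySem.List.pyGetD nums i 0) := by
    intro d i
    simp only [List.length_cons, List.length_nil]
    rw [show PySem.List.pyRange 0 ((2 : Nat) : Int) 1 = [0, 1] from by decide]
    by_cases hij : i = (j : Int)
    · subst hij
      rw [if_pos (by simp), if_pos rfl]
      simp only [List.foldl_cons, List.foldl_nil, hg0, hg1]
      simp [hjkI]
    · by_cases hik : i = (k : Int)
      · subst hik
        rw [if_pos (by simp), if_neg hkjI, if_pos rfl]
        simp only [List.foldl_cons, List.foldl_nil, hg0, hg1]
        simp [hkjI]
      · have hc : ¬ [(j : Int), (k : Int)].contains i = true := by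
          simp only [List.contains_cons, List.contains_nil, Bool.or_eq_true, beq_iff_eq]
          push Not
          exact ⟨fun h => hij h, fun h => hik h, by simp⟩
        rw [if_neg hc, if_neg hij, if_neg hik]
  rw [PySem.List.foldl_congr_mem _ _ _ _ (fun d i _ => hstep d i)]
  rw [pvSetFold _ nums.length _ (List.length_replicate)]
  rfl
theorem pvBits_lt (m n : Nat) (h : m < 2 ^ n) : pvBits m (n + 1) = pvBits m n := by
  unfold pvBits
  rw [List.range_succ, List.filter_append]
  simp [Nat.testBit_eq_false_of_lt h]

theorem pvBits_add (m n : Nat) (h : m < 2 ^ n) :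
    pvBits (2 ^ n + m) (n + 1) = pvBits m n ++ [(n : Int)] := by
  unfold pvBits
  rw [List.range_succ, List.filter_append,
      List.filter_congr (l := List.range n)
        (q := fun t => m.testBit t)
        (fun t htm => by
          rw [Nat.testBit_two_pow_add_gt (by simpa using htm)]),
      List.map_append]
  congr 1
  simp [Nat.testBit_two_pow_add_eq, Nat.testBit_eq_false_of_lt h]

theorem pvBits_zero (n : Nat) : pvBits 0 n = [] := by
  simp [pvBits]

theorem pvZ (n : Nat) :
    (List.range (2 ^ n)).filter (fun m => decide (pvBits m n = [])) = [0] := by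
  induction n with
  | zero => decide
  | succ n ih =>
    have hsplit : List.range (2 ^ (n + 1)) = List.range (2 ^ n) ++ (List.range (2 ^ n)).map (fun x => 2 ^ n + x) := by
      rw [← List.range_add]; congr 1; ring
    rw [hsplit, List.filter_append]
    rw [List.filter_congr (q := fun m => decide (pvBits m n = []))
        (fun m hm => by
          rw [pvBits_lt m n (by simpa using hm)]),
      ih, List.filter_map]
    have : (List.range (2 ^ n)).filter ((fun m => decide (pvBits m (n + 1) = [])) ∘ (fun x => 2 ^ n + x)) = [] := by
      apply List.filter_eq_nil_iff.mpr
      intro m hm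
      simp only [Function.comp_apply, decide_eq_true_eq]
      rw [pvBits_add m n (by simpa using hm)]
      simp
    rw [this]
    simp

theorem pvS1 (n : Nat) :
    ((List.range (2 ^ n)).filter (fun m => decide ((pvBits m n).length = 1))).map (fun m => pvBits m n)
      = (List.range n).map (fun (j : Nat) => [(j : Int)]) := by
  induction n with
  | zero => decide
  | succ n ih =>
    have hsplit : List.range (2 ^ (n + 1)) = List.range (2 ^ n) ++ (List.range (2 ^ n)).map (fun x => 2 ^ n + x) := by
      rw [← List.range_add]; congr 1; ring
    rw [hsplit, List.filter_append, List.map_append]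
    have hfirst :
        ((List.range (2 ^ n)).filter (fun m => decide ((pvBits m (n + 1)).length = 1))).map (fun m => pvBits m (n + 1))
          = (List.range n).map (fun (j : Nat) => [(j : Int)]) := by
      rw [List.filter_congr (q := fun m => decide ((pvBits m n).length = 1))
          (fun m hm => by rw [pvBits_lt m n (by simpa using hm)])]
      rw [← ih]
      apply List.map_congr_left
      intro m hm
      exact pvBits_lt m n (by simpa using (List.mem_filter.mp hm).1)
    have hsecond :
        (((List.range (2 ^ n)).map (fun x => 2 ^ n + x)).filter (fun m => decide ((pvBits m (n + 1)).length = 1))).map (fun m => pvBits m (n + 1))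
          = [[(n : Int)]] := by
      rw [List.filter_map, List.map_map]
      rw [List.filter_congr (q := fun m => decide (pvBits m n = []))
          (fun m hm => by
            have hmlt : m < 2 ^ n := by simpa using hm
            simp only [Function.comp_apply, pvBits_add m n hmlt, List.length_append]
            simp [List.length_eq_zero_iff]),
        pvZ]
      have h0 : pvBits (2 ^ n) (n + 1) = [((n : Nat) : Int)] := by
        have := pvBits_add 0 n (by positivity)
        simpa [pvBits_zero] using this
      simp [h0]
    rw [hfirst, hsecond, List.range_succ, List.map_append]
    simp

theorem pvS2 (n : Nat) :
    ((List.range (2 ^ n)).filter (fun m => decide ((pvBits m n).length = 2))).map (fun m => pvBits m n)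
      = (List.range n).flatMap (fun k => (List.range k).map (fun (j : Nat) => [(j : Int), (k : Int)])) := by
  induction n with
  | zero => decide
  | succ n ih =>
    have hsplit : List.range (2 ^ (n + 1)) = List.range (2 ^ n) ++ (List.range (2 ^ n)).map (fun x => 2 ^ n + x) := by
      rw [← List.range_add]; congr 1; ring
    rw [hsplit, List.filter_append, List.map_append]
    have hfirst :
        ((List.range (2 ^ n)).filter (fun m => decide ((pvBits m (n + 1)).length = 2))).map (fun m => pvBits m (n + 1))
          = (List.range n).flatMap (fun k => (List.range k).map (fun (j : Nat) => [(j : Int), (k : Int)])) := by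
      rw [List.filter_congr (q := fun m => decide ((pvBits m n).length = 2))
          (fun m hm => by rw [pvBits_lt m n (by simpa using hm)])]
      rw [← ih]
      apply List.map_congr_left
      intro m hm
      exact pvBits_lt m n (by simpa using (List.mem_filter.mp hm).1)
    have hsecond :
        (((List.range (2 ^ n)).map (fun x => 2 ^ n + x)).filter (fun m => decide ((pvBits m (n + 1)).length = 2))).map (fun m => pvBits m (n + 1))
          = (List.range n).map (fun (j : Nat) => [(j : Int), (n : Int)]) := by
      rw [List.filter_map, List.map_map]
      rw [List.filter_congr (q := fun m => decide ((pvBits m n).length = 1))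
          (fun m hm => by
            have hmlt : m < 2 ^ n := by simpa using hm
            simp only [Function.comp_apply, pvBits_add m n hmlt, List.length_append]
            exact decide_eq_decide.mpr (by simp))]
      rw [List.map_congr_left
          (g := fun m => pvBits m n ++ [(n : Int)])
          (fun m hm => by
            have hmlt : m < 2 ^ n := by simpa using (List.mem_filter.mp hm).1
            simpa using pvBits_add m n hmlt)]
      rw [show (fun m => pvBits m n ++ [(n : Int)]) = (fun l => l ++ [(n : Int)]) ∘ (fun m => pvBits m n) from rfl]
      rw [← List.map_map, pvS1]
      simp [List.map_map]
    rw [hfirst, hsecond, List.range_succ, List.flatMap_append]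
    simp


theorem pvFoldlIf' {α β : Type} (p : α → Prop) [DecidablePred p] (f : α → β) (l : List α)
    (acc : List β) :
    l.foldl (fun acc x => if p x then acc ++ [f x] else acc) acc
      = acc ++ (l.filter (fun x => decide (p x))).map f := by
  induction l generalizing acc with
  | nil => simp
  | cons x xs ih =>
    by_cases h : p x <;> simp [h, ih]

theorem pvA_eq (nums : List Int) :
    pick_2_subset nums
      = ((List.range (2 ^ nums.length)).filter (fun m => decide ((pvBits m nums.length).length = 2))).map
          (fun m => mk_new_list nums (pvBits m nums.length)) := by
  unfold pick_2_subset
  rw [show ((1 : Int) <<< nums.length) = ((2 ^ nums.length : Nat) : Int) from by simp [Int.shiftLeft_eq],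
    PySem.List.pyRange_one 0 ((2 ^ nums.length : Nat) : Int), List.foldl_map,
    show (((2 ^ nums.length : Nat) : Int) - 0).toNat = 2 ^ nums.length from by rw [sub_zero, Int.toNat_natCast]]
  have hstep : ∀ (acc : List (List Int)), ∀ m ∈ List.range (2 ^ nums.length),
      (fun (dumies : List (List Int)) (i : Int) =>
        let temp : List Int :=
          (PySem.List.pyRange 0 (nums.length : Int) 1).foldl (fun temp j =>
            if PySem.Int.band i ((1 : Int) <<< j.toNat) ≠ 0 then temp ++ [j] else temp) []
        if temp.length = 2 then dumies ++ [mk_new_list nums temp] else dumies) acc ((0 : Int) + (m : Int))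
      = (fun (dumies : List (List Int)) (m : Nat) =>
          if (pvBits m nums.length).length = 2 then dumies ++ [mk_new_list nums (pvBits m nums.length)] else dumies) acc m := by
    intro acc m _
    simp only [zero_add, pvTemp m nums.length]
  rw [PySem.List.foldl_congr_mem _ _ _ _ hstep]
  rw [pvFoldlIf' (fun m : Nat => (pvBits m nums.length).length = 2)
      (fun m : Nat => mk_new_list nums (pvBits m nums.length))]
  simp

theorem pvB_eq (nums : List Int) :
    pick_2_subset_alt nums
      = (List.range nums.length).flatMap (fun k => (List.range k).map (fun j => pvSwap nums j k)) := by
  unfold pick_2_subset_alt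
  rw [PySem.List.pyRange_one (0 : Int) (nums.length : Int), List.foldl_map]
  have hout : ∀ (out : List (List Int)), ∀ k ∈ List.range (((nums.length : Int) - 0)).toNat,
      (PySem.List.pyRange 0 ((0 : Int) + (k : Int)) 1).foldl (fun out j =>
        out ++ [(PySem.List.enumerate nums).map (fun tx =>
          if tx.1 = j then PySem.List.pyGetD nums ((0 : Int) + (k : Int)) 0
          else if tx.1 = ((0 : Int) + (k : Int)) then PySem.List.pyGetD nums j 0
          else tx.2)]) out
      = out ++ (List.range k).map (fun j => pvSwap nums j k) := by
    intro out k _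
    simp only [zero_add]
    rw [PySem.List.pyRange_one (0 : Int) (k : Int), List.foldl_map]
    rw [PySem.List.foldl_append_singleton_eq_map
        (fun j : Nat => (PySem.List.enumerate nums).map (fun tx =>
          if tx.1 = ((0 : Int) + (j : Int)) then PySem.List.pyGetD nums (k : Int) 0
          else if tx.1 = (k : Int) then PySem.List.pyGetD nums ((0 : Int) + (j : Int)) 0
          else tx.2))]
    simp only [zero_add, Int.toNat_natCast, sub_zero]
    congr 1
    apply List.map_congr_left
    intro j _
    rw [PySem.List.enumerate_eq_map_pyRange nums (0 : Int), List.map_map]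
    unfold pvSwap
    rw [PySem.List.pyRange_one]
    rw [List.map_map]
    apply List.map_congr_left
    intro t ht
    have htl : t < nums.length := by simpa [PySem.List.len] using ht
    simp [PySem.List.pyGetD_ofNat nums t 0 htl]
  rw [PySem.List.foldl_congr_mem _ _ _ _ (fun out k hk => hout out k hk)]
  rw [PySem.List.foldl_append_eq_flatMap (fun k : Nat => (List.range k).map (fun j => pvSwap nums j k))]
  simp

-- A = B, the equivalence itself
theorem pvEq (nums : List Int) : pick_2_subset nums = pick_2_subset_alt nums := by
  rw [pvA_eq, pvB_eq]
  rw [show (fun m => mk_new_list nums (pvBits m nums.length))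
        = (fun temp => mk_new_list nums temp) ∘ (fun m => pvBits m nums.length) from rfl]
  rw [← List.map_map, pvS2 nums.length, List.map_flatMap]
  apply List.flatMap_congr
  intro k hk
  rw [List.map_map]
  apply List.map_congr_left
  intro j hj
  have hjk : j < k := by simpa using hj
  exact pvMk nums j k (by omega)

-- ===== VERDICT (by name: the statement is the Claim_ definition above) =====
theorem pick_2_subset_spec : Claim_equal_pick_2_subset := by
  intro nums_list _
  unfold Spec_pick_2_subset
  exact pvEq nums_list
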